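-- pv_equiv track=rewrite | github.com/zhangzhijin1018/enterprise-knowledge-agentic-rag | core/analytics/intent/validator.py | _has_sql_fields
-- ===== SOURCE A (Python) =====
-- def _has_sql_fields(intent_dict: dict) -> bool:
--     """检查是否存在 SQL 相关字段。"""
--
--     sql_field_patterns = [
--         "raw_sql",
--         "generated_sql",
--         "sql_text",
--         "sql",
--         "executed_sql",
--         "query_sql",
--         "result_sql",
--         "final_sql",
--     ]
--
--     for key in intent_dict:
--         for pattern in sql_field_patterns:
--             if pattern in key.lower():
--                 value = intent_dict[key]
--                 if value and str(value).strip():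
--                     return True
--
--     return False
-- ===== SOURCE B (Python) =====
-- def _has_sql_fields(intent_dict: dict) -> bool:
--     """检查是否存在 SQL 相关字段。"""
--     # Every pattern in A's list contains "sql", and "sql" itself is a pattern,
--     # so a key matches some pattern iff "sql" occurs in the lowered key.
--     return any(
--         "sql" in key.lower() and value and str(value).strip()
--         for key, value in intent_dict.items()
--     )
-- ===== Notes on version B (the rewrite author's own statement) =====
-- stated objective: simpler
-- what changed: All 8 patterns contain 'sql' and 'sql' is itself a pattern, so the nested key-by-pattern loop with early return collapses to a single any() over items() testing 'sql' in key.lower() plus the same truthiness guard on the value.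
import Mathlib
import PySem

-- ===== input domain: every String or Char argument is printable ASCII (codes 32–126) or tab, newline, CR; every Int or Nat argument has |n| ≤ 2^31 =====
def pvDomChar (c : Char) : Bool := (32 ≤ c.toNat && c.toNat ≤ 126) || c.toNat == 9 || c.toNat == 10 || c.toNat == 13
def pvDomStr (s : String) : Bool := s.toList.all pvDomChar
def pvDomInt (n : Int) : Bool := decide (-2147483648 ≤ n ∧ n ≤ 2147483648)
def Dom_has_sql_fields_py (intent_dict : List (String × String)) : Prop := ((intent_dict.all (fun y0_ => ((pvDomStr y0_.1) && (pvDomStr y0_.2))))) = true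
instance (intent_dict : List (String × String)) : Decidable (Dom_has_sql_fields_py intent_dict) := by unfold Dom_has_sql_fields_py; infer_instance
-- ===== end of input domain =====

-- B collapses A's nested 8-pattern loop into a single "sql"-membership test
-- over the dict items (simpler; every pattern contains "sql" and "sql" is a pattern).

-- ===== PORT A =====
def pvSqlPatterns : List String :=
  ["raw_sql", "generated_sql", "sql_text", "sql", "executed_sql", "query_sql", "result_sql", "final_sql"]

-- inner 'for pattern in sql_field_patterns' loop for one key
def pvInnerA (d : PySem.Dict String String) (key : String) : List String → Bool
  | [] => false
  | p :: ps =>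
    if PySem.Str.isIn p (PySem.Str.lower key) then
      -- intent_dict[key]: key always comes from iterating the dict, so the lookup succeeds
      let value := (d.get? key).getD ""
      if (value != "") && (PySem.Str.strip value != "") then true
      else pvInnerA d key ps
    else pvInnerA d key ps

-- outer 'for key in intent_dict' loop
def pvOuterA (d : PySem.Dict String String) : List String → Bool
  | [] => false
  | k :: ks => if pvInnerA d k pvSqlPatterns then true else pvOuterA d ks

def has_sql_fields_py (intent_dict : List (String × String)) : Bool :=
  let d := PySem.Dict.ofList intent_dict
  pvOuterA d d.keys

-- ===== PORT B =====
def has_sql_fields_py_alt (intent_dict : List (String × String)) : Bool :=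
  (PySem.Dict.ofList intent_dict).items.any (fun kv =>
    PySem.Str.isIn "sql" (PySem.Str.lower kv.1) && (kv.2 != "") && (PySem.Str.strip kv.2 != ""))

-- ===== PRECONDITION & SPEC =====
def Spec_has_sql_fields_py (intent_dict : List (String × String)) (out : Bool) : Prop := out = has_sql_fields_py_alt intent_dict
instance (intent_dict : List (String × String)) (out : Bool) : Decidable (Spec_has_sql_fields_py intent_dict out) := by unfold Spec_has_sql_fields_py; infer_instance

-- ===== CLAIM (what is proved, stated in full; the proofs are below) =====
def Claim_equal_has_sql_fields_py : Prop := ∀ (intent_dict : List (String × String)), Dom_has_sql_fields_py intent_dict → Spec_has_sql_fields_py intent_dict (has_sql_fields_py intent_dict)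

-- ===== LEMMAS AND PROOFS =====

-- a pattern containing "sql" cannot occur when "sql" does not occur
theorem pv_notIn (p s : List Char) (hp : ['s', 'q', 'l'] <:+: p)
    (hg : PySem.Chars.isIn ['s', 'q', 'l'] s = false) : PySem.Chars.isIn p s = false := by
  cases hh : PySem.Chars.isIn p s
  · rfl
  · rw [PySem.Chars.isIn_iff_infix] at hh
    rw [PySem.Chars.isIn_eq_false_iff] at hg
    exact absurd (hp.trans hh) hg

-- the inner pattern loop is the single "sql" membership test
theorem pv_inner_eq (d : PySem.Dict String String) (k v : String)
    (hget : d.get? k = some v) :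
    pvInnerA d k pvSqlPatterns
      = (PySem.Str.isIn "sql" (PySem.Str.lower k) && (v != "") && (PySem.Str.strip v != "")) := by
  cases hg : PySem.Str.isIn "sql" (PySem.Str.lower k)
  · have hg' : PySem.Chars.isIn ['s', 'q', 'l'] (PySem.Chars.lower k.toList) = false := by
      simpa [PySem.Str.isIn, PySem.Str.toList_lower] using hg
    have h1 : PySem.Chars.isIn ['r', 'a', 'w', '_', 's', 'q', 'l'] (PySem.Chars.lower k.toList) = false :=
      pv_notIn _ _ (by decide) hg'
    have h2 : PySem.Chars.isIn ['g', 'e', 'n', 'e', 'r', 'a', 't', 'e', 'd', '_', 's', 'q', 'l'] (PySem.Chars.lower k.toList) = false :=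
      pv_notIn _ _ (by decide) hg'
    have h3 : PySem.Chars.isIn ['s', 'q', 'l', '_', 't', 'e', 'x', 't'] (PySem.Chars.lower k.toList) = false :=
      pv_notIn _ _ (by decide) hg'
    have h5 : PySem.Chars.isIn ['e', 'x', 'e', 'c', 'u', 't', 'e', 'd', '_', 's', 'q', 'l'] (PySem.Chars.lower k.toList) = false :=
      pv_notIn _ _ (by decide) hg'
    have h6 : PySem.Chars.isIn ['q', 'u', 'e', 'r', 'y', '_', 's', 'q', 'l'] (PySem.Chars.lower k.toList) = false :=
      pv_notIn _ _ (by decide) hg'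
    have h7 : PySem.Chars.isIn ['r', 'e', 's', 'u', 'l', 't', '_', 's', 'q', 'l'] (PySem.Chars.lower k.toList) = false :=
      pv_notIn _ _ (by decide) hg'
    have h8 : PySem.Chars.isIn ['f', 'i', 'n', 'a', 'l', '_', 's', 'q', 'l'] (PySem.Chars.lower k.toList) = false :=
      pv_notIn _ _ (by decide) hg'
    simp [pvInnerA, pvSqlPatterns, h1, h2, h3, h5, h6, h7, h8, hg']
  · cases hc : ((v != "") && (PySem.Str.strip v != ""))
    · simp [pvInnerA, pvSqlPatterns, hget, hc]
    · have hg' : PySem.Chars.isIn ['s', 'q', 'l'] (PySem.Chars.lower k.toList) = true := by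
        simpa [PySem.Str.isIn, PySem.Str.toList_lower] using hg
      simp [pvInnerA, pvSqlPatterns, hget, hc]
      exact .inr (.inr (.inr (.inl hg')))

-- the outer key loop over any item sublist whose lookups succeed
theorem pv_outer_eq (d : PySem.Dict String String) (l : List (String × String))
    (h : ∀ p ∈ l, d.get? p.1 = some p.2) :
    pvOuterA d (l.map (·.1))
      = l.any (fun kv =>
          PySem.Str.isIn "sql" (PySem.Str.lower kv.1) && (kv.2 != "") && (PySem.Str.strip kv.2 != "")) := by
  induction l with
  | nil => rfl
  | cons kv rest ih =>
    have hget := h kv (List.mem_cons_self ..)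
    have hrest : ∀ p ∈ rest, d.get? p.1 = some p.2 := fun p hp => h p (List.mem_cons_of_mem _ hp)
    simp only [List.map_cons, pvOuterA, List.any_cons, ih hrest,
      pv_inner_eq d kv.1 kv.2 hget]
    cases h' : (PySem.Str.isIn "sql" (PySem.Str.lower kv.1) && (kv.2 != "") && (PySem.Str.strip kv.2 != "")) <;> simp

-- ===== VERDICT (by name: the statement is the Claim_ definition above) =====
theorem has_sql_fields_py_spec : Claim_equal_has_sql_fields_py := by
  intro intent_dict _
  unfold Spec_has_sql_fields_py has_sql_fields_py has_sql_fields_py_alt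
  have hnd : (PySem.Dict.ofList intent_dict).keys.Nodup := PySem.Dict.nodup_keys_ofList intent_dict
  have h : ∀ p ∈ (PySem.Dict.ofList intent_dict).items,
      (PySem.Dict.ofList intent_dict).get? p.1 = some p.2 := by
    intro p hp
    obtain ⟨k, v⟩ := p
    exact PySem.Dict.get?_of_mem_items _ hp hnd
  exact pv_outer_eq _ _ h
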